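-- pv_equiv track=rewrite | github.com/Zaki-Ahmed1/ci_project | task.py | conv_endian
-- ===== SOURCE A (Python) =====
-- def conv_endian(num, endian='big'):
--     val_num = num
--     num = abs(num)
--     array = []
--     # Check num
--     if num == 0:
--         return "00"
--     # Check if parameter endian is big and little
--     if endian != "big" and endian != "little":
--         return None
--     while num != 0:
--         # Append value of value
--         remainder = num % 16
--         num = int(num / 16)
--         if remainder > 9:
--             val = chr(ord('A') + remainder - 10)
--             array.append(val)
--         else:
--             # Append value of remainder
--             array.append(remainder)
--     # If length of array is odd, append 0
--     if len(array) % 2 == 1: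
--         array.append(0)
--
--     ans = ""
--     temp = ""
--     for i in range(len(array) - 1, -1, -1):
--         temp = temp + str(array[i])
--         ans, temp = conv_endian_help(i, endian, temp, ans)
--
--     if endian == 'little':
--         # remove space when adding negative
--         ans = ans[:-1]
--         # reverse the array (doing a second reverse here)
--         ans = ans[::-1]
--     # if number less than 0 (which is negative) add symbol
--     if val_num < 0:
--         ans = "-" + ans
--     # remove the last space at the end
--     if ans[len(ans) - 1] == " ":
--         ans = ans[:len(ans) - 1]
--     return ans
--
-- def conv_endian_help(i, endian, temp, ans):
--     if i % 2 == 0: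
--         if endian == 'little':
--             temp = temp[::-1]
--         ans = ans + temp
--         ans = ans + " "
--         temp = ""
--
--     return ans, temp
-- ===== SOURCE B (Python) =====
-- def conv_endian(num, endian='big'):
--     if num == 0:
--         return "00"
--     if endian != "big" and endian != "little":
--         return None
--     h = format(abs(num), 'X')
--     if len(h) % 2 == 1:
--         h = '0' + h
--     byts = [h[i:i+2] for i in range(0, len(h), 2)]
--     if endian == 'little':
--         byts.reverse()
--     s = ' '.join(byts)
--     return '-' + s if num < 0 else s
-- ===== Notes on version B (the rewrite author's own statement) =====
-- stated objective: simpler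
-- what changed: Replaces the digit-by-digit division loop with mixed int/char array, the index-counting pair-grouping helper and the double string reversal by: hex-format the absolute value, pad to even length, chunk into two-character bytes, reverse the byte list for little endian, and join with spaces.
import Mathlib
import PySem

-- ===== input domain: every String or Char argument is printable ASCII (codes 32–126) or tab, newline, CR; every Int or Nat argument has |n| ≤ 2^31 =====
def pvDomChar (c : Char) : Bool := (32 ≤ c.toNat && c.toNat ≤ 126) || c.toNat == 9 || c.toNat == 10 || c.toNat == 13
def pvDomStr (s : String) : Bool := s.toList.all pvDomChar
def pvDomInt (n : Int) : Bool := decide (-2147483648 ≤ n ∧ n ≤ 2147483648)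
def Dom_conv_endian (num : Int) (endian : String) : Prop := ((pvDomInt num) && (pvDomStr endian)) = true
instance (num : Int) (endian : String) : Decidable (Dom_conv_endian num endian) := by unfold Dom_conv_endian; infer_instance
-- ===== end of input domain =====

-- B replaces A's division loop + index-parity grouping + double reversal by format/pad/chunk/join (objective: simpler).


-- ===== PORT A =====
-- Python strings are carried as List Char (Python s+t = ++, s[::-1] = reverse, s[:-1] = dropLast,
-- s[len(s)-1] = getLast?); on the domain |num| ≤ 2^31, abs(num) is num.natAbs and int(num/16) on a
-- nonnegative int is exact Nat division by 16 — each step is exact there.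
-- the digit appended to `array` (an int 0..9 rendered later by str(), or a letter char) as the chars str() yields
def convA_digit (r : Nat) : List Char :=
  if r > 9 then [Char.ofNat (65 + r - 10)] else PySem.Int.toChars (r : Int)

-- the while loop: append digits of n, least significant first
def convA_loop (n : Nat) (array : List (List Char)) : List (List Char) :=
  if n = 0 then array else convA_loop (n / 16) (array ++ [convA_digit (n % 16)])
decreasing_by exact Nat.div_lt_self (Nat.pos_of_ne_zero (by assumption)) (by norm_num)

def conv_endian_help (i : Int) (endian : String) (temp ans : List Char) : List Char × List Char :=
  if PySem.Int.mod i 2 = 0 then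
    let temp := if endian = "little" then temp.reverse else temp
    (ans ++ temp ++ [' '], [])
  else (ans, temp)

def conv_endian (num : Int) (endian : String) : Option String :=
  let val_num := num
  let n := num.natAbs
  if n = 0 then some "00"
  else if endian ≠ "big" ∧ endian ≠ "little" then none
  else
    let array := convA_loop n []
    let array := if array.length % 2 = 1 then array ++ [['0']] else array
    let p := (PySem.List.pyRange ((array.length : Int) - 1) (-1) (-1)).foldl
      (fun (st : List Char × List Char) i =>
        let temp := st.2 ++ PySem.List.pyGetD array i []
        conv_endian_help i endian temp st.1) ([], [])
    let ans := p.1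
    let ans := if endian = "little" then (ans.dropLast).reverse else ans
    let ans := if val_num < 0 then '-' :: ans else ans
    let ans := if ans.getLast? = some ' ' then ans.dropLast else ans
    some (String.ofList ans)

-- ===== PORT B =====
-- format(m,'X'): uppercase hex digit of r (0..15)
def convB_dig (r : Nat) : Char := if r < 10 then Char.ofNat (48 + r) else Char.ofNat (55 + r)

-- format(m,'X') for m ≥ 0, most significant digit first
def convB_hex (n : Nat) : List Char :=
  if _h : n < 16 then [convB_dig n] else convB_hex (n / 16) ++ [convB_dig (n % 16)]
decreasing_by exact Nat.div_lt_self (by omega) (by norm_num)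

def conv_endian_alt (num : Int) (endian : String) : Option String :=
  if num = 0 then some "00"
  else if endian ≠ "big" ∧ endian ≠ "little" then none
  else
    let h := convB_hex num.natAbs
    let h := if h.length % 2 = 1 then '0' :: h else h
    -- [h[i:i+2] for i in range(0, len(h), 2)]
    let byts := (PySem.List.pyRange 0 (h.length : Int) 2).map
      (fun i => PySem.List.slice h (some i) (some (i + 2)))
    let byts := if endian = "little" then byts.reverse else byts
    let s := PySem.Chars.join [' '] byts
    some (String.ofList (if num < 0 then '-' :: s else s))

-- ===== PRECONDITION & SPEC =====
def Spec_conv_endian (num : Int) (endian : String) (out : Option String) : Prop := out = conv_endian_alt num endian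
instance (num : Int) (endian : String) (out : Option String) : Decidable (Spec_conv_endian num endian out) := by unfold Spec_conv_endian; infer_instance

-- ===== CLAIM (what is proved, stated in full; the proofs are below) =====
def Claim_equal_conv_endian : Prop := ∀ (num : Int) (endian : String), Dom_conv_endian num endian → Spec_conv_endian num endian (conv_endian num endian)

-- ===== LEMMAS AND PROOFS =====

-- proof-side helpers: digits of n, least significant first, as B renders them
def pvRevC (n : Nat) : List Char :=
  if n = 0 then [] else convB_dig (n % 16) :: pvRevC (n / 16)
decreasing_by exact Nat.div_lt_self (Nat.pos_of_ne_zero (by assumption)) (by norm_num)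

def pvPair (endian : String) (a b : Char) : List Char :=
  if endian = "little" then [b, a] else [a, b]

-- what A's grouping fold produces, read off the MSB-first char list
def pvW (endian : String) : List Char → List Char
  | a :: b :: t => pvPair endian a b ++ [' '] ++ pvW endian t
  | _ => []

def pvChunk2 : List Char → List (List Char)
  | a :: b :: t => [a, b] :: pvChunk2 t
  | _ => []

theorem pvDig_eq (r : Nat) (h : r < 16) : convA_digit r = [convB_dig r] := by
  interval_cases r <;> decide

theorem pvDig_ne_space (r : Nat) (h : r < 16) : convB_dig r ≠ ' ' := by
  interval_cases r <;> decide

theorem pvRevC_ne_nil {n : Nat} (h : n ≠ 0) : pvRevC n ≠ [] := by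
  rw [pvRevC]; simp [h]

theorem pvRevC_mem (n : Nat) : ∀ c ∈ pvRevC n, c ≠ ' ' := by
  induction n using Nat.strong_induction_on with
  | _ n ih =>
    rw [pvRevC]
    by_cases h : n = 0
    · simp [h]
    · simp only [if_neg h]
      intro c hc
      rcases List.mem_cons.mp hc with h1 | h1
      · subst h1; exact pvDig_ne_space _ (Nat.mod_lt _ (by norm_num))
      · exact ih (n / 16) (Nat.div_lt_self (Nat.pos_of_ne_zero h) (by norm_num)) c h1

theorem convA_loop_eq (n : Nat) : ∀ acc, convA_loop n acc = acc ++ (pvRevC n).map (fun c => [c]) := by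
  induction n using Nat.strong_induction_on with
  | _ n ih =>
    intro acc
    rw [convA_loop, pvRevC]
    by_cases h : n = 0
    · simp [h]
    · simp only [if_neg h]
      rw [ih (n / 16) (Nat.div_lt_self (Nat.pos_of_ne_zero h) (by norm_num)),
          pvDig_eq _ (Nat.mod_lt _ (by norm_num))]
      simp

theorem convB_hex_eq (n : Nat) (h : n ≠ 0) : convB_hex n = (pvRevC n).reverse := by
  induction n using Nat.strong_induction_on with
  | _ n ih =>
    rw [convB_hex, pvRevC, if_neg h]
    by_cases h16 : n < 16
    · rw [dif_pos h16, Nat.mod_eq_of_lt h16, Nat.div_eq_of_lt h16, pvRevC]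
      simp
    · rw [dif_neg h16,
          ih (n / 16) (Nat.div_lt_self (Nat.pos_of_ne_zero h) (by norm_num))
            (Nat.div_ne_zero_iff.mpr ⟨by norm_num, by omega⟩)]
      simp

theorem pvFold_eq (endian : String) (cs : List Char) :
    ∀ k, k ≤ cs.length → k % 2 = 0 → ∀ ans : List Char,
    (PySem.List.pyRange ((k : Int) - 1) (-1) (-1)).foldl
      (fun (st : List Char × List Char) i =>
        conv_endian_help i endian (st.2 ++ PySem.List.pyGetD (cs.map (fun c => [c])) i []) st.1)
      (ans, [])
    = (ans ++ pvW endian ((cs.take k).reverse), []) := by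
  intro k
  induction k using Nat.strong_induction_on with
  | _ k ih =>
    intro hk hk2 ans
    by_cases h0 : k = 0
    · subst h0
      rw [PySem.List.pyRange_neg_one_eq_nil (by norm_num)]
      simp [pvW]
    · obtain ⟨j, rfl⟩ : ∃ j, k = j + 2 := ⟨k - 2, by omega⟩
      have hj1 : j + 1 < cs.length := by omega
      have hj0 : j < cs.length := by omega
      have hg1 : PySem.List.pyGetD (cs.map (fun c => [c])) (((j + 2 : Nat) : Int) - 1) []
          = [cs[j + 1]] := by
        have he : (((j + 2 : Nat) : Int) - 1) = ((j + 1 : Nat) : Int) := by push_cast; ring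
        rw [he, PySem.List.pyGetD_natCast, List.getD_eq_getElem _ _ (by simpa using hj1)]
        simp
      have hg0 : PySem.List.pyGetD (cs.map (fun c => [c])) (((j + 2 : Nat) : Int) - 1 - 1) []
          = [cs[j]] := by
        have he : (((j + 2 : Nat) : Int) - 1 - 1) = ((j : Nat) : Int) := by push_cast; ring
        rw [he, PySem.List.pyGetD_natCast, List.getD_eq_getElem _ _ (by simpa using hj0)]
        simp
      have hm1 : ¬ PySem.Int.mod (((j + 2 : Nat) : Int) - 1) 2 = 0 := by
        rw [PySem.Int.mod_eq_emod_of_pos (by norm_num)]; omega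
      have hm0 : PySem.Int.mod (((j + 2 : Nat) : Int) - 1 - 1) 2 = 0 := by
        rw [PySem.Int.mod_eq_emod_of_pos (by norm_num)]; omega
      have hrest : (((j + 2 : Nat) : Int) - 1 - 1 - 1) = ((j : Nat) : Int) - 1 := by
        push_cast; ring
      simp only [conv_endian_help] at ih ⊢
      rw [PySem.List.pyRange_neg_one_cons (by push_cast; omega),
          PySem.List.pyRange_neg_one_cons (by push_cast; omega)]
      simp only [List.foldl_cons, hg1, hg0, if_neg hm1, if_pos hm0, List.nil_append, hrest]
      rw [ih j (by omega) (by omega) (by omega)]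
      have htake : cs.take (j + 2) = (cs.take j ++ [cs[j]]) ++ [cs[j + 1]] := by
        rw [List.take_add_one, List.take_add_one]
        simp [hj0, hj1]
      have hrev : (cs.take (j + 2)).reverse = cs[j + 1] :: cs[j] :: (cs.take j).reverse := by
        rw [htake]; simp
      rw [hrev]
      by_cases hl : endian = "little" <;>
        simp [hl, pvW, pvPair, List.append_assoc]

theorem pvChunk_aux : ∀ (m : Nat) (h : List Char), h.length = 2 * m →
    (List.range m).map (fun k => (h.drop (2 * k)).take 2) = pvChunk2 h := by
  intro m
  induction m with
  | zero =>
    intro h hh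
    have hnil : h = [] := List.length_eq_zero_iff.mp (by omega)
    subst hnil; simp [pvChunk2]
  | succ m ih =>
    intro h hh
    match h, hh with
    | a :: b :: t, hh =>
      rw [List.range_succ_eq_map]
      simp only [List.map_cons, List.map_map]
      have : ((fun k => ((a :: b :: t).drop (2 * k)).take 2) ∘ Nat.succ)
          = fun k => (t.drop (2 * k)).take 2 := by
        funext k
        have : 2 * Nat.succ k = 2 * k + 2 := by omega
        simp [this, List.drop_succ_cons]
      rw [this, ih t (by simpa using (by omega : (a :: b :: t).length - 2 = 2 * m))]
      simp [pvChunk2]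

theorem pvByts_eq (h : List Char) (he : h.length % 2 = 0) :
    (PySem.List.pyRange 0 (h.length : Int) 2).map
      (fun i => PySem.List.slice h (some i) (some (i + 2))) = pvChunk2 h := by
  obtain ⟨m, hm⟩ : ∃ m, h.length = 2 * m := ⟨h.length / 2, by omega⟩
  rw [PySem.List.pyRange_of_pos 0 (h.length : Int) (by norm_num)]
  by_cases h0 : m = 0
  · subst h0
    have hnil : h = [] := List.length_eq_zero_iff.mp (by omega)
    subst hnil; simp [pvChunk2]
  · have hlt : (0 : Int) < (h.length : Int) := by
      have : 0 < h.length := by omega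
      exact_mod_cast this
    rw [if_pos hlt]
    have hcount : (((h.length : Int) - 0 + 2 - 1) / 2).toNat = m := by omega
    rw [hcount, List.map_map]
    rw [← pvChunk_aux m h hm]
    apply List.map_congr_left
    intro k hk
    have h1 : ((0 : Int) + 2 * (k : Int)) = ((2 * k : Nat) : Int) := by push_cast; ring
    have h2 : ((0 : Int) + 2 * (k : Int) + 2) = ((2 * k : Nat) : Int) + ((2 : Nat) : Int) := by
      push_cast; ring
    simp only [Function.comp]
    rw [h1]
    have := PySem.List.slice_natCast_add h (2 * k) 2
    simpa using this

theorem pvW_ne_nil (a b : Char) (t : List Char) (endian : String) :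
    pvW endian (a :: b :: t) ≠ [] := by
  rw [pvW]; simp

theorem pvChunk2_cons (a b : Char) (t : List Char) :
    pvChunk2 (a :: b :: t) = [a, b] :: pvChunk2 t := rfl

theorem pvJoin_append_singleton : ∀ (xs : List (List Char)) (y : List Char), xs ≠ [] →
    PySem.Chars.join [' '] (xs ++ [y])
      = PySem.Chars.join [' '] xs ++ [' '] ++ y := by
  intro xs
  induction xs with
  | nil => intro y hy; exact absurd rfl hy
  | cons x xs ih =>
    intro y _
    rcases xs with _ | ⟨x2, xs⟩
    · simp [PySem.Chars.join_cons_cons, PySem.Chars.join_singleton]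
    · have ih' := ih y (by simp)
      have e1 : (x :: x2 :: xs) ++ [y] = x :: ((x2 :: xs) ++ [y]) := by simp
      have e2 : (x2 :: xs) ++ [y] = x2 :: (xs ++ [y]) := by simp
      rw [e1, e2, PySem.Chars.join_cons_cons [' '] x x2 (xs ++ [y]), ← e2, ih',
          PySem.Chars.join_cons_cons [' '] x x2 xs]
      simp [List.append_assoc]

theorem pvW_big_dropLast : ∀ (h : List Char), h.length % 2 = 0 → h ≠ [] →
    (pvW "big" h).dropLast = PySem.Chars.join [' '] (pvChunk2 h) := by
  intro h
  induction h using pvChunk2.induct with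
  | case1 a b t ih =>
    intro he _
    rcases t with _ | ⟨c, t'⟩
    · simp [pvW, pvPair, pvChunk2, PySem.Chars.join_singleton]
    · rcases t' with _ | ⟨d, t''⟩
      · simp at he
      · have hne := pvW_ne_nil c d t'' "big"
        rw [pvW, List.dropLast_append_of_ne_nil hne,
            ih (by simp at he ⊢; omega) (by simp),
            pvChunk2_cons a b, pvChunk2_cons c d,
            PySem.Chars.join_cons_cons [' '] [a, b] [c, d] (pvChunk2 t'')]
        simp [pvPair]
  | case2 h hcomp =>
    intro he hne
    rcases h with _ | ⟨a, t⟩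
    · exact absurd rfl hne
    · rcases t with _ | ⟨b, t'⟩
      · simp at he
      · exact (hcomp a b t' rfl).elim

theorem pvW_lit_dropLast : ∀ (h : List Char), h.length % 2 = 0 → h ≠ [] →
    ((pvW "little" h).dropLast).reverse = PySem.Chars.join [' '] ((pvChunk2 h).reverse) := by
  intro h
  induction h using pvChunk2.induct with
  | case1 a b t ih =>
    intro he _
    rcases t with _ | ⟨c, t'⟩
    · simp [pvW, pvPair, pvChunk2, PySem.Chars.join_singleton]
    · rcases t' with _ | ⟨d, t''⟩
      · simp at he
      · have hne := pvW_ne_nil c d t'' "little"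
        have hchne : (pvChunk2 (c :: d :: t'')).reverse ≠ [] := by
          rw [pvChunk2_cons]; simp
        rw [pvW, List.dropLast_append_of_ne_nil hne, List.reverse_append,
            ih (by simp at he ⊢; omega) (by simp),
            pvChunk2_cons a b, List.reverse_cons,
            pvJoin_append_singleton _ _ hchne]
        simp [pvPair, List.append_assoc]
  | case2 h hcomp =>
    intro he hne
    rcases h with _ | ⟨a, t⟩
    · exact absurd rfl hne
    · rcases t with _ | ⟨b, t'⟩
      · simp at he
      · exact (hcomp a b t' rfl).elim

theorem pvW_big_last : ∀ (h : List Char), h.length % 2 = 0 → h ≠ [] →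
    (pvW "big" h).getLast? = some ' ' := by
  intro h
  induction h using pvChunk2.induct with
  | case1 a b t ih =>
    intro he _
    rcases t with _ | ⟨c, t'⟩
    · simp [pvW, pvPair]
    · rcases t' with _ | ⟨d, t''⟩
      · simp at he
      · have hne := pvW_ne_nil c d t'' "big"
        rw [pvW, List.getLast?_append_of_ne_nil _ hne,
            ih (by simp at he ⊢; omega) (by simp)]
  | case2 h hcomp =>
    intro he hne
    rcases h with _ | ⟨a, t⟩
    · exact absurd rfl hne
    · rcases t with _ | ⟨b, t'⟩
      · simp at he
      · exact (hcomp a b t' rfl).elim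

theorem pvW_lit_head (a b : Char) (t : List Char) :
    ((pvW "little" (a :: b :: t)).dropLast).head? = some b := by
  rw [pvW]
  simp [pvPair, List.dropLast_cons_of_ne_nil]

-- ===== VERDICT (by name: the statement is the Claim_ definition above) =====
theorem conv_endian_spec : Claim_equal_conv_endian := by
  intro num endian _
  unfold Spec_conv_endian
  by_cases h0 : num = 0
  · simp [conv_endian, conv_endian_alt, h0]
  · have hn : num.natAbs ≠ 0 := fun h => h0 (Int.natAbs_eq_zero.mp h)
    by_cases he : endian ≠ "big" ∧ endian ≠ "little"
    · simp only [conv_endian, conv_endian_alt, if_neg hn, if_pos he, if_neg h0]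
    · have hbl : endian = "big" ∨ endian = "little" := by tauto
      simp only [conv_endian, conv_endian_alt, if_neg hn, if_neg he, if_neg h0,
        convA_loop_eq num.natAbs [], List.nil_append, convB_hex_eq num.natAbs hn,
        List.length_map, List.length_reverse]
      set r := pvRevC num.natAbs with hr
      have hrne : r ≠ [] := by rw [hr]; exact pvRevC_ne_nil hn
      have hrmem : ∀ c ∈ r, c ≠ ' ' := by rw [hr]; exact pvRevC_mem num.natAbs
      set cs := if r.length % 2 = 1 then r ++ ['0'] else r with hcs
      have hev : cs.length % 2 = 0 := by
        rw [hcs]; by_cases hp : r.length % 2 = 1 <;> simp [hp] <;> omega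
      have hcne : cs ≠ [] := by
        rw [hcs]; by_cases hp : r.length % 2 = 1 <;> simp [hp, hrne]
      have hmem : ∀ c ∈ cs, c ≠ ' ' := by
        intro c hc
        rw [hcs] at hc
        by_cases hp : r.length % 2 = 1
        · rw [if_pos hp] at hc
          rcases List.mem_append.mp hc with h | h
          · exact hrmem c h
          · simp at h; subst h; decide
        · rw [if_neg hp] at hc; exact hrmem c hc
      have hpadA : (if r.length % 2 = 1 then List.map (fun c : Char => [c]) r ++ [['0']]
          else List.map (fun c : Char => [c]) r) = List.map (fun c : Char => [c]) cs := by
        rw [hcs]; by_cases hp : r.length % 2 = 1 <;> simp [hp]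
      have hpadB : (if r.length % 2 = 1 then '0' :: r.reverse else r.reverse) = cs.reverse := by
        rw [hcs]; by_cases hp : r.length % 2 = 1 <;> simp [hp]
      rw [hpadA, hpadB]
      simp only [List.length_map]
      have hfold := pvFold_eq endian cs cs.length le_rfl hev []
      rw [List.take_length] at hfold
      simp only [List.nil_append] at hfold
      rw [hfold]
      rw [pvByts_eq cs.reverse (by simpa using hev)]
      obtain ⟨a, b, t, hcr⟩ : ∃ a b t, cs.reverse = a :: b :: t := by
        rcases hx : cs.reverse with _ | ⟨a, t⟩
        · exact absurd (by simpa using hx) hcne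
        · rcases t with _ | ⟨b, t'⟩
          · exfalso
            have : cs.length = 1 := by
              have := congrArg List.length hx
              simpa using this
            omega
          · exact ⟨a, b, t', rfl⟩
      rw [hcr]
      have hlen : (a :: b :: t).length % 2 = 0 := by
        rw [← hcr]; simpa using hev
      have hbmem : b ≠ ' ' := hmem b (List.mem_reverse.mp (by rw [hcr]; simp))
      rcases hbl with hbig | hlit
      · subst hbig
        simp only [ite_false, String.reduceEq]
        have hwne : pvW "big" (a :: b :: t) ≠ [] := pvW_ne_nil a b t "big"
        have hlast : (pvW "big" (a :: b :: t)).getLast? = some ' ' :=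
          pvW_big_last _ hlen (by simp)
        have hdrop : (pvW "big" (a :: b :: t)).dropLast
            = PySem.Chars.join [' '] (pvChunk2 (a :: b :: t)) :=
          pvW_big_dropLast _ hlen (by simp)
        by_cases hneg : num < 0
        · simp only [if_pos hneg]
          have h1 : ('-' :: pvW "big" (a :: b :: t)).getLast? = some ' ' := by
            rw [show ('-' :: pvW "big" (a :: b :: t)) = ['-'] ++ pvW "big" (a :: b :: t) from rfl,
              List.getLast?_append_of_ne_nil _ hwne]
            exact hlast
          rw [if_pos h1,
            show ('-' :: pvW "big" (a :: b :: t)) = ['-'] ++ pvW "big" (a :: b :: t) from rfl,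
            List.dropLast_append_of_ne_nil hwne, hdrop]
          simp
        · simp only [if_neg hneg]
          rw [if_pos hlast, hdrop]
      · subst hlit
        simp only [ite_true]
        have hs : ((pvW "little" (a :: b :: t)).dropLast).reverse
            = PySem.Chars.join [' '] ((pvChunk2 (a :: b :: t)).reverse) :=
          pvW_lit_dropLast _ hlen (by simp)
        have hslast : (((pvW "little" (a :: b :: t)).dropLast).reverse).getLast? = some b := by
          rw [List.getLast?_reverse]
          exact pvW_lit_head a b t
        have hsne : ((pvW "little" (a :: b :: t)).dropLast).reverse ≠ [] := by
          intro hx; rw [hx] at hslast; simp at hslast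
        by_cases hneg : num < 0
        · simp only [if_pos hneg]
          have h1 : ('-' :: ((pvW "little" (a :: b :: t)).dropLast).reverse).getLast? = some b := by
            rw [show ('-' :: ((pvW "little" (a :: b :: t)).dropLast).reverse)
                = ['-'] ++ ((pvW "little" (a :: b :: t)).dropLast).reverse from rfl,
              List.getLast?_append_of_ne_nil _ hsne]
            exact hslast
          rw [if_neg (by rw [h1]; simp [hbmem]), hs]
        · simp only [if_neg hneg]
          rw [if_neg (by rw [hslast]; simp [hbmem]), hs]
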